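-- pv_equiv track=rewrite | github.com/MarceloRangelDev/Python | Atividade_final_modulo_1/Lista_Exercicios_Python.py | verificar_sequencia
-- ===== SOURCE A (Python) =====
-- def verificar_sequencia(s):
--     encontrou_b = False
--     for char in s:
--         if char == 'b':
--             encontrou_b = True
--         elif char == 'a' and encontrou_b:
--             return False
--     return True
-- ===== SOURCE B (Python) =====
-- def verificar_sequencia(s):
--     first_b = s.find('b')
--     return first_b == -1 or s.rfind('a') < first_b
-- ===== Notes on version B (the rewrite author's own statement) =====
-- stated objective: idiomatic
-- what changed: Replaces the stateful flag loop with a comparison of two extremal indices obtained by str.find (earliest b) and str.rfind (latest a): some a follows some b iff the latest-a index exceeds the earliest-b index.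
import Mathlib
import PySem

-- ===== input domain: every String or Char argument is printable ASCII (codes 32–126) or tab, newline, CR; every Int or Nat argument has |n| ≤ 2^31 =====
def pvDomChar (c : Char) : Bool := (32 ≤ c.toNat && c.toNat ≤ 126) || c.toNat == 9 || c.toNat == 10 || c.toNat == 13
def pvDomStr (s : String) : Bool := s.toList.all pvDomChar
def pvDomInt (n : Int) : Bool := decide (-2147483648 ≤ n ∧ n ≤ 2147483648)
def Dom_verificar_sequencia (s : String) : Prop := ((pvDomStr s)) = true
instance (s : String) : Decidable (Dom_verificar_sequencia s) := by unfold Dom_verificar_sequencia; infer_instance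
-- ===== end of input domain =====

-- B replaces A's stateful flag loop by comparing the index of the first 'b' (find)
-- with the index of the last 'a' (rfind); same O(n) cost, more idiomatic.

-- ===== PORT A =====
-- the for-loop over the characters with the 'encontrou_b' flag
def pvA_loop : List Char → Bool → Bool
  | [], _ => true
  | c :: cs, fb =>
      if c = 'b' then pvA_loop cs true
      else if c = 'a' ∧ fb then false
      else pvA_loop cs fb

def verificar_sequencia (s : String) : Bool := pvA_loop s.toList false

-- ===== PORT B =====
def verificar_sequencia_alt (s : String) : Bool :=
  let first_b := PySem.Str.find s "b"
  (first_b == -1) || decide (PySem.Str.rfind s "a" < first_b)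

-- ===== PRECONDITION & SPEC =====
def Spec_verificar_sequencia (s : String) (out : Bool) : Prop := out = verificar_sequencia_alt s
instance (s : String) (out : Bool) : Decidable (Spec_verificar_sequencia s out) := by unfold Spec_verificar_sequencia; infer_instance

-- ===== CLAIM (what is proved, stated in full; the proofs are below) =====
def Claim_equal_verificar_sequencia : Prop := ∀ (s : String), Dom_verificar_sequencia s → Spec_verificar_sequencia s (verificar_sequencia s)

-- ===== LEMMAS AND PROOFS =====

-- find.go shifts its start index uniformly (singleton pattern)
theorem pv_find_go_succ (x : Char) (cs : List Char) (k : Nat) :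
    PySem.Chars.find.go [x] cs (k + 1) =
      (if PySem.Chars.find.go [x] cs k = -1 then -1 else PySem.Chars.find.go [x] cs k + 1) := by
  induction cs generalizing k with
  | nil => simp [PySem.Chars.find.go]
  | cons c cs ih =>
      simp only [PySem.Chars.find.go]
      by_cases h : [x].isPrefixOf (c :: cs)
      · simp [h]
      · simp [h, ih (k + 1)]

theorem pv_find_cons (x c : Char) (cs : List Char) :
    PySem.Chars.find (c :: cs) [x] =
      (if c = x then 0
       else if PySem.Chars.find cs [x] = -1 then -1 else PySem.Chars.find cs [x] + 1) := by
  show PySem.Chars.find.go [x] (c :: cs) 0 = _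
  rw [PySem.Chars.find.go]
  have hpre : [x].isPrefixOf (c :: cs) = (x == c) := by
    simp [List.isPrefixOf]
  rw [show (0 + 1 : Nat) = 1 from rfl]
  rw [show (1 : Nat) = 0 + 1 from rfl, pv_find_go_succ]
  by_cases h : c = x
  · simp [hpre, h]
  · have : (x == c) = false := by simp [Ne.symm h]
    simp [hpre, this, PySem.Chars.find, h]

theorem pv_rfind_go_succ (x c : Char) (cs : List Char) (k : Nat) :
    PySem.Chars.rfind.go (c :: cs) [x] (k + 1) =
      (if PySem.Chars.rfind.go cs [x] k = -1 then (if c = x then 0 else -1)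
       else PySem.Chars.rfind.go cs [x] k + 1) := by
  induction k with
  | zero =>
      simp only [PySem.Chars.rfind.go]
      have hpre : [x].isPrefixOf (c :: cs) = (x == c) := by simp [List.isPrefixOf]
      by_cases h : [x].isPrefixOf cs
      · simp [h]
      · by_cases hc : c = x
        · simp [h, hpre, hc]
        · have : (x == c) = false := by simp [Ne.symm hc]
          simp [h, hpre, this, hc]
  | succ j ih =>
      have step : PySem.Chars.rfind.go (c :: cs) [x] (j + 1 + 1) =
          (if [x].isPrefixOf (List.drop (j + 1) cs) then ((j : Int) + 2)
           else PySem.Chars.rfind.go (c :: cs) [x] (j + 1)) := by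
        conv_lhs => rw [PySem.Chars.rfind.go]
        norm_num [List.drop_succ_cons]
        split_ifs <;> omega
      have step' : PySem.Chars.rfind.go cs [x] (j + 1) =
          (if [x].isPrefixOf (List.drop (j + 1) cs) then ((j : Int) + 1)
           else PySem.Chars.rfind.go cs [x] j) := by
        conv_lhs => rw [PySem.Chars.rfind.go]
        norm_num
      rw [step, step', ih]
      by_cases h : [x].isPrefixOf (List.drop (j + 1) cs)
      · simp only [h, if_true]
        split_ifs <;> omega
      · simp [h]

theorem pv_rfind_nil (x : Char) : PySem.Chars.rfind [] [x] = -1 := by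
  simp [PySem.Chars.rfind, PySem.Chars.rfind.go, List.isPrefixOf]

theorem pv_rfind_cons (x c : Char) (cs : List Char) :
    PySem.Chars.rfind (c :: cs) [x] =
      (if PySem.Chars.rfind cs [x] = -1 then (if c = x then 0 else -1)
       else PySem.Chars.rfind cs [x] + 1) := by
  show PySem.Chars.rfind.go (c :: cs) [x] (cs.length + 1) = _
  rw [pv_rfind_go_succ]
  rfl

theorem pv_neg_one_le_rfind (x : Char) (l : List Char) : -1 ≤ PySem.Chars.rfind l [x] := by
  induction l with
  | nil => rw [pv_rfind_nil]
  | cons c cs ih =>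
      rw [pv_rfind_cons]
      split_ifs <;> omega

theorem pv_rfind_eq_neg_one_iff (x : Char) (l : List Char) :
    PySem.Chars.rfind l [x] = -1 ↔ x ∉ l := by
  induction l with
  | nil => simp [pv_rfind_nil]
  | cons c cs ih =>
      rw [pv_rfind_cons]
      have := pv_neg_one_le_rfind x cs
      by_cases h : PySem.Chars.rfind cs [x] = -1
      · by_cases hc : c = x <;> simp [h, hc, ih.mp h] <;> simp [Ne.symm hc]
      · have hx : x ∈ cs := by by_contra hx; exact h (ih.mpr hx)
        simp [h, hx]
        omega

-- once the flag is set, A returns false iff an 'a' remains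
theorem pv_loop_true (l : List Char) : pvA_loop l true = !(decide ('a' ∈ l)) := by
  induction l with
  | nil => simp [pvA_loop]
  | cons c cs ih =>
      by_cases hb : c = 'b'
      · simp [pvA_loop, hb, ih]
      · by_cases ha : c = 'a'
        · simp [pvA_loop, ha]
        · simp [pvA_loop, hb, ha, ih]
          exact fun _ hh => ha hh.symm

theorem pv_key (a b a' b' : Int) (h : (a = -1 ∨ b < a) ↔ (a' = -1 ∨ b' < a')) :
    ((a == -1) || decide (b < a)) = ((a' == -1) || decide (b' < a')) := by
  have hd : decide (a = -1 ∨ b < a) = decide (a' = -1 ∨ b' < a') := decide_eq_decide.mpr h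
  simpa [Bool.decide_or] using hd

theorem pv_main (l : List Char) :
    pvA_loop l false =
      ((PySem.Chars.find l ['b'] == -1) || decide (PySem.Chars.rfind l ['a'] < PySem.Chars.find l ['b'])) := by
  induction l with
  | nil => simp [pvA_loop, PySem.Chars.find, PySem.Chars.find.go]
  | cons c cs ih =>
      rw [pv_find_cons, pv_rfind_cons]
      have hf : -1 ≤ PySem.Chars.find cs ['b'] := PySem.Chars.neg_one_le_find cs ['b']
      have hr : -1 ≤ PySem.Chars.rfind cs ['a'] := pv_neg_one_le_rfind 'a' cs
      by_cases hb : c = 'b'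
      · -- A: flag becomes true; B: first_b = 0
        rw [show pvA_loop (c :: cs) false = pvA_loop cs true by simp [pvA_loop, hb]]
        rw [pv_loop_true]
        by_cases hA : PySem.Chars.rfind cs ['a'] = -1
        · have hni : 'a' ∉ cs := (pv_rfind_eq_neg_one_iff 'a' cs).mp hA
          simp [hb, hA, hni]
        · have hin : 'a' ∈ cs := by
            by_contra hx; exact hA ((pv_rfind_eq_neg_one_iff 'a' cs).mpr hx)
          simp [hb, hA, hin]
          omega
      · -- flag stays false: A skips c; B shifts both indices by one
        rw [show pvA_loop (c :: cs) false = pvA_loop cs false by simp [pvA_loop, hb]]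
        rw [ih]
        apply pv_key
        by_cases ha : c = 'a' <;> simp [hb, ha] <;> split_ifs <;> omega

-- ===== VERDICT (by name: the statement is the Claim_ definition above) =====
theorem verificar_sequencia_spec : Claim_equal_verificar_sequencia := by
  intro s _
  show pvA_loop s.toList false = _
  unfold verificar_sequencia_alt
  rw [PySem.Str.find_eq, PySem.Str.rfind_eq]
  exact pv_main s.toList
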